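-- pv_equiv track=rewrite | github.com/ardakocmg/restin-ai-04-02-26 | main-new2801-with-hr-main/main-new2801-with-hr-main/backend/services/diagram_generator.py | generate_state_diagram
-- ===== SOURCE A (Python) =====
-- from typing import List, Dict, Any
--
-- def generate_state_diagram(steps: List[Dict[str, Any]]) -> str:
--     """Generate mermaid state diagram"""
--     mermaid = "stateDiagram-v2\n"
--     mermaid += "    [*] --> INITIATED\n"
--
--     for i, step in enumerate(steps):
--         step_id = step.get('step_id', f'STEP_{i}')
--         status = step.get('status', 'PENDING')
--
--         if i == 0:
--             mermaid += f"    INITIATED --> {step_id}\n"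
--         else:
--             prev_id = steps[i-1].get('step_id', f'STEP_{i-1}')
--             mermaid += f"    {prev_id} --> {step_id}\n"
--
--         # Add note for failed steps
--         if status == 'FAILED':
--             mermaid += f"    {step_id} --> [*]: ❌ FAILED\n"
--             break
--
--     # Complete if all success
--     if all(s.get('status') == 'SUCCESS' for s in steps):
--         last_step = steps[-1].get('step_id', 'FINAL')
--         mermaid += f"    {last_step} --> [*]: ✓ COMPLETE\n"
--
--     return mermaid
-- ===== SOURCE B (Python) =====
-- from typing import List, Dict, Any
--
-- def generate_state_diagram(steps: List[Dict[str, Any]]) -> str: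
--     """Generate mermaid state diagram (chain-of-pairs decomposition)."""
--     ids = [s.get('step_id', f'STEP_{i}') for i, s in enumerate(steps)]
--     fail = next((i for i, s in enumerate(steps) if s.get('status') == 'FAILED'), None)
--     cut = len(ids) if fail is None else fail + 1
--     chain = ['INITIATED'] + ids[:cut]
--     lines = ["stateDiagram-v2\n", "    [*] --> INITIATED\n"]
--     lines += [f"    {a} --> {b}\n" for a, b in zip(chain, chain[1:])]
--     if fail is not None:
--         lines.append(f"    {ids[fail]} --> [*]: \u274c FAILED\n")
--     if all(s.get('status') == 'SUCCESS' for s in steps):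
--         lines.append(f"    {steps[-1].get('step_id', 'FINAL')} --> [*]: \u2713 COMPLETE\n")
--     return "".join(lines)
-- ===== Notes on version B (the rewrite author's own statement) =====
-- stated objective: alternative
-- what changed: Replaces the single stateful loop with break and in-loop prev re-lookup by a pipeline: precompute the id list, locate the first FAILED index, and emit one transition per consecutive pair of the truncated chain, joining the collected lines at the end.
import Mathlib
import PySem

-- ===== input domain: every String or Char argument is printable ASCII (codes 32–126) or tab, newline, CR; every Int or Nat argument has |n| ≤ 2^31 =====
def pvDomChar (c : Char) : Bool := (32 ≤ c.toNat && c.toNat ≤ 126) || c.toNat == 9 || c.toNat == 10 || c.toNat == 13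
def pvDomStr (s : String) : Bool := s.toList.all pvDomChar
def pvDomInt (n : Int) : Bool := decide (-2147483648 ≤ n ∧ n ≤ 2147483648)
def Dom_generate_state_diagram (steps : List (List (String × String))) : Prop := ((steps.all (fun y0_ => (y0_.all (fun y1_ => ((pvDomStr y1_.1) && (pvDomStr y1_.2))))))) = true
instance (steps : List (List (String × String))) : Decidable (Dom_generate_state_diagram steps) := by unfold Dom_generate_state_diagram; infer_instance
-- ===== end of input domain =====

-- B replaces A's single break-loop by precomputed ids + first-FAILED index + pairwise chain lines joined at the end (alternative decomposition, same cost).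


-- ===== PORT A =====
-- step.get(k, d) on the Python dict built from the association list
def pvGetD (step : List (String × String)) (k d : String) : String :=
  (PySem.Dict.ofList step).getD k d

-- s.get('status') == 'SUCCESS' / 'FAILED' (no default: None on a missing key)
def pvStatusIs (step : List (String × String)) (v : String) : Bool :=
  (PySem.Dict.ofList step).get? "status" == some v

-- the `for i, step in enumerate(steps)` loop with its break, carrying the growing string
def pvALoop (steps : List (List (String × String))) :
    List (List (String × String)) → Nat → String → String
  | [], _, acc => acc
  | step :: rest, i, acc =>
      let step_id := pvGetD step "step_id" ("STEP_" ++ PySem.Int.toStr (i : Int))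
      let status := pvGetD step "status" "PENDING"
      let acc2 :=
        if i == 0 then acc ++ "    INITIATED --> " ++ step_id ++ "\n"
        else
          let prev_id := pvGetD ((PySem.List.pyGet? steps ((i : Int) - 1)).getD [])
              "step_id" ("STEP_" ++ PySem.Int.toStr ((i : Int) - 1))
          acc ++ "    " ++ prev_id ++ " --> " ++ step_id ++ "\n"
      if status == "FAILED" then acc2 ++ "    " ++ step_id ++ " --> [*]: ❌ FAILED\n"
      else pvALoop steps rest (i + 1) acc2

def generate_state_diagram (steps : List (List (String × String))) : String :=
  let mermaid := "stateDiagram-v2\n" ++ "    [*] --> INITIATED\n"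
  let mermaid := pvALoop steps steps 0 mermaid
  if steps.all (fun s => pvStatusIs s "SUCCESS") then
    let last_step := pvGetD ((PySem.List.pyGet? steps (-1)).getD []) "step_id" "FINAL"
    mermaid ++ "    " ++ last_step ++ " --> [*]: ✓ COMPLETE\n"
  else mermaid

-- ===== PORT B =====
def generate_state_diagram_alt (steps : List (List (String × String))) : String :=
  let ids := (PySem.List.enumerate steps).map
      (fun p => pvGetD p.2 "step_id" ("STEP_" ++ PySem.Int.toStr p.1))
  let fail := ((PySem.List.enumerate steps).find? (fun p => pvStatusIs p.2 "FAILED")).map (·.1)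
  let cut : Int := match fail with | none => (ids.length : Int) | some f => f + 1
  let chain := "INITIATED" :: PySem.List.slice ids none (some cut)
  let lines := ["stateDiagram-v2\n", "    [*] --> INITIATED\n"]
      ++ (chain.zip (PySem.List.slice chain (some 1) none)).map
          (fun p => "    " ++ p.1 ++ " --> " ++ p.2 ++ "\n")
  let lines := match fail with
    | none => lines
    | some f => lines ++ ["    " ++ (PySem.List.pyGet? ids f).getD "" ++ " --> [*]: ❌ FAILED\n"]
  let lines := if steps.all (fun s => pvStatusIs s "SUCCESS") then
      lines ++ ["    " ++ pvGetD ((PySem.List.pyGet? steps (-1)).getD []) "step_id" "FINAL" ++ " --> [*]: ✓ COMPLETE\n"]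
    else lines
  PySem.Str.join "" lines

-- ===== PRECONDITION & SPEC =====
-- Pre_ excludes only the empty list, on which A (and B) raise IndexError at steps[-1].
def Pre_generate_state_diagram (steps : List (List (String × String))) : Prop := steps ≠ []
instance (steps : List (List (String × String))) : Decidable (Pre_generate_state_diagram steps) := by
  unfold Pre_generate_state_diagram; infer_instance
def pvWitness_generate_state_diagram : (List (List (String × String))) :=
  [[("step_id", "A"), ("status", "SUCCESS")]]

def Spec_generate_state_diagram (steps : List (List (String × String))) (out : String) : Prop := out = generate_state_diagram_alt steps
instance (steps : List (List (String × String))) (out : String) : Decidable (Spec_generate_state_diagram steps out) := by unfold Spec_generate_state_diagram; infer_instance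

-- ===== CLAIM (what is proved, stated in full; the proofs are below) =====
def Claim_equal_generate_state_diagram : Prop := ∀ (steps : List (List (String × String))), Dom_generate_state_diagram steps → Pre_generate_state_diagram steps → Spec_generate_state_diagram steps (generate_state_diagram steps)


-- ===== LEMMAS AND PROOFS =====

-- the step id of entry s at (python) index i
def pvSid (s : List (String × String)) (i : Int) : String :=
  pvGetD s "step_id" ("STEP_" ++ PySem.Int.toStr i)

-- the transition lines (and FAILED note) both programs emit, as one recursion
def pvChain (prev : String) : List (List (String × String)) → Int → String
  | [], _ => ""
  | s :: rest, i =>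
      if pvStatusIs s "FAILED" then
        "    " ++ prev ++ " --> " ++ pvSid s i ++ "\n" ++
          ("    " ++ pvSid s i ++ " --> [*]: ❌ FAILED\n")
      else
        "    " ++ prev ++ " --> " ++ pvSid s i ++ "\n" ++ pvChain (pvSid s i) rest (i + 1)

def pvPrev (pre : List (List (String × String))) : String :=
  match pre.getLast? with
  | none => "INITIATED"
  | some s => pvSid s ((pre.length : Int) - 1)

def pvIds (l : List (List (String × String))) (j : Int) : List String :=
  (PySem.List.enumerate l j).map (fun p => pvSid p.2 p.1)

def pvWalk (prev : String) : List String → String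
  | [] => ""
  | id :: rest => "    " ++ prev ++ " --> " ++ id ++ "\n" ++ pvWalk id rest

def pvComplete (steps : List (List (String × String))) : String :=
  "    " ++ pvGetD ((PySem.List.pyGet? steps (-1)).getD []) "step_id" "FINAL" ++ " --> [*]: ✓ COMPLETE\n"

def pvOut (steps : List (List (String × String))) : String :=
  let body := "stateDiagram-v2\n" ++ ("    [*] --> INITIATED\n" ++ pvChain "INITIATED" steps 0)
  if steps.all (fun s => pvStatusIs s "SUCCESS") then body ++ pvComplete steps else body

lemma statusTest (s : List (String × String)) :
    (pvGetD s "status" "PENDING" == "FAILED") = pvStatusIs s "FAILED" := by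
  unfold pvGetD pvStatusIs
  rw [PySem.Dict.getD_eq_get?_getD]
  cases h : (PySem.Dict.ofList s).get? "status" <;> simp

lemma lemA (suf : List (List (String × String))) :
    ∀ (pre : List (List (String × String))) (acc : String),
    pvALoop (pre ++ suf) suf pre.length acc = acc ++ pvChain (pvPrev pre) suf (pre.length : Int) := by
  induction suf with
  | nil => intro pre acc; simp [pvALoop, pvChain, String.append_empty]
  | cons s rest ih =>
    intro pre acc
    rw [show pvALoop (pre ++ s :: rest) (s :: rest) pre.length acc
        = (if (pvGetD s "status" "PENDING" == "FAILED") then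
            (if pre.length == 0 then acc ++ "    INITIATED --> " ++ pvSid s (pre.length : Int) ++ "\n"
             else acc ++ "    " ++
               pvGetD ((PySem.List.pyGet? (pre ++ s :: rest) ((pre.length : Int) - 1)).getD [])
                 "step_id" ("STEP_" ++ PySem.Int.toStr ((pre.length : Int) - 1)) ++
               " --> " ++ pvSid s (pre.length : Int) ++ "\n")
              ++ "    " ++ pvSid s (pre.length : Int) ++ " --> [*]: ❌ FAILED\n"
          else pvALoop (pre ++ s :: rest) rest (pre.length + 1)
            (if pre.length == 0 then acc ++ "    INITIATED --> " ++ pvSid s (pre.length : Int) ++ "\n"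
             else acc ++ "    " ++
               pvGetD ((PySem.List.pyGet? (pre ++ s :: rest) ((pre.length : Int) - 1)).getD [])
                 "step_id" ("STEP_" ++ PySem.Int.toStr ((pre.length : Int) - 1)) ++
               " --> " ++ pvSid s (pre.length : Int) ++ "\n")) from by
      simp only [pvALoop, pvSid]]
    have hacc2 : (if pre.length == 0 then acc ++ "    INITIATED --> " ++ pvSid s (pre.length : Int) ++ "\n"
             else acc ++ "    " ++
               pvGetD ((PySem.List.pyGet? (pre ++ s :: rest) ((pre.length : Int) - 1)).getD [])
                 "step_id" ("STEP_" ++ PySem.Int.toStr ((pre.length : Int) - 1)) ++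
               " --> " ++ pvSid s (pre.length : Int) ++ "\n")
        = acc ++ ("    " ++ pvPrev pre ++ " --> " ++ pvSid s (pre.length : Int) ++ "\n") := by
      cases hpre : pre.getLast? with
      | none =>
        have : pre = [] := List.getLast?_eq_none_iff.mp hpre
        subst this
        simp only [List.length_nil, beq_self_eq_true, if_true, pvPrev, hpre]
        simp only [String.append_assoc]
        rfl
      | some v =>
        have hne : pre ≠ [] := by
          intro h; subst h; simp at hpre
        have hlen : 1 ≤ pre.length := by
          cases pre with
          | nil => exact absurd rfl hne
          | cons _ _ => simp
        have hb : (pre.length == 0) = false := by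
          simp; omega
        rw [hb]
        have hidx : ((pre.length : Int) - 1) = ((pre.length - 1 : Nat) : Int) := by omega
        have hget : PySem.List.pyGet? (pre ++ s :: rest) ((pre.length : Int) - 1) = some v := by
          rw [hidx, PySem.List.pyGet?_natCast]
          rw [List.getElem?_append_left (by omega)]
          rw [← List.getLast?_eq_getElem?]
          exact hpre
        rw [hget]
        simp only [Option.getD_some, pvPrev, hpre]
        rw [show pvGetD v "step_id" ("STEP_" ++ PySem.Int.toStr ((pre.length : Int) - 1))
            = pvSid v ((pre.length : Int) - 1) from rfl]
        rw [if_neg (by simp)]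
        simp only [String.append_assoc]
    rw [hacc2, statusTest]
    cases hf : pvStatusIs s "FAILED" with
    | false =>
      rw [if_neg (by simp)]
      rw [show pre ++ s :: rest = (pre ++ [s]) ++ rest by simp]
      rw [show pre.length + 1 = (pre ++ [s]).length by simp]
      rw [ih (pre ++ [s])]
      have hprev : pvPrev (pre ++ [s]) = pvSid s (pre.length : Int) := by
        unfold pvPrev
        rw [List.getLast?_concat]
        show pvSid s (((pre ++ [s]).length : Int) - 1) = pvSid s (pre.length : Int)
        congr 1
        simp only [List.length_append, List.length_cons, List.length_nil]
        push_cast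
        ring
      rw [hprev]
      rw [show pvChain (pvPrev pre) (s :: rest) (pre.length : Int)
          = "    " ++ pvPrev pre ++ " --> " ++ pvSid s (pre.length : Int) ++ "\n" ++
            pvChain (pvSid s (pre.length : Int)) rest ((pre.length : Int) + 1) from by
        simp only [pvChain, hf]
        rw [if_neg (by simp)]]
      rw [show ((pre ++ [s]).length : Int) = (pre.length : Int) + 1 by simp]
      simp only [String.append_assoc]
    | true =>
      rw [if_pos rfl]
      rw [show pvChain (pvPrev pre) (s :: rest) (pre.length : Int)
          = "    " ++ pvPrev pre ++ " --> " ++ pvSid s (pre.length : Int) ++ "\n" ++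
            ("    " ++ pvSid s (pre.length : Int) ++ " --> [*]: ❌ FAILED\n") from by
        simp only [pvChain, hf]
        rw [if_pos trivial]]
      simp only [String.append_assoc]

lemma findFail (l : List (List (String × String))) :
    ∀ (j : Int),
    ((PySem.List.enumerate l j).find? (fun p => pvStatusIs p.2 "FAILED")).map (·.1)
      = (l.findIdx? (fun s => pvStatusIs s "FAILED")).map (fun n => j + (n : Int)) := by
  induction l with
  | nil => intro j; simp [PySem.List.enumerate]
  | cons s rest ih =>
    intro j
    rw [PySem.List.enumerate_cons, List.findIdx?_cons]
    cases hf : pvStatusIs s "FAILED" with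
    | true => simp [hf]
    | false =>
      rw [List.find?_cons]
      simp only [hf]
      rw [if_neg (by simp)]
      rw [ih (j + 1)]
      cases hfi : rest.findIdx? (fun s => pvStatusIs s "FAILED") with
      | none => simp
      | some n => simp; ring

lemma coreB (l : List (List (String × String))) :
    ∀ (prev : String) (j : Int),
    (match l.findIdx? (fun s => pvStatusIs s "FAILED") with
     | none => pvWalk prev (pvIds l j)
     | some n => pvWalk prev ((pvIds l j).take (n + 1)) ++
         ("    " ++ ((pvIds l j).getD n "") ++ " --> [*]: ❌ FAILED\n"))
      = pvChain prev l j := by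
  induction l with
  | nil => intro prev j; simp [pvIds, PySem.List.enumerate, pvWalk, pvChain]
  | cons s rest ih =>
    intro prev j
    have hids : pvIds (s :: rest) j = pvSid s j :: pvIds rest (j + 1) := by
      simp [pvIds, PySem.List.enumerate_cons]
    rw [List.findIdx?_cons]
    cases hf : pvStatusIs s "FAILED" with
    | true =>
      rw [if_pos (by simp)]
      simp only [hids]
      rw [show pvChain prev (s :: rest) j
          = "    " ++ prev ++ " --> " ++ pvSid s j ++ "\n" ++
            ("    " ++ pvSid s j ++ " --> [*]: ❌ FAILED\n") from by
        simp only [pvChain, hf]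
        rw [if_pos trivial]]
      simp [pvWalk, String.append_assoc, String.append_empty]
    | false =>
      rw [if_neg (by simp)]
      rw [show pvChain prev (s :: rest) j
          = "    " ++ prev ++ " --> " ++ pvSid s j ++ "\n" ++
            pvChain (pvSid s j) rest (j + 1) from by
        simp [pvChain, hf]]
      rw [← ih (pvSid s j) (j + 1)]
      cases hfi : rest.findIdx? (fun s => pvStatusIs s "FAILED") with
      | none => simp [hids, pvWalk, String.append_assoc]
      | some n => simp [hids, pvWalk, String.append_assoc]

lemma joinEmpty (ls : List String) : PySem.Str.join "" ls = ls.foldr (· ++ ·) "" := by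
  induction ls with
  | nil => rfl
  | cons a ls ih =>
    cases ls with
    | nil =>
      apply String.toList_inj.mp
      simp [PySem.Str.toList_join, PySem.Chars.join_singleton]
    | cons b l2 =>
      apply String.toList_inj.mp
      have h2 := congrArg String.toList ih
      rw [PySem.Str.toList_join] at h2
      rw [PySem.Str.toList_join]
      simp only [List.map_cons, PySem.Chars.join_cons_cons, List.foldr_cons, String.toList_append]
      rw [← List.map_cons, h2]
      simp

lemma walkFold (xs : List String) :
    ∀ (prev : String) (t : String),
    List.foldr (· ++ ·) t (((prev :: xs).zip xs).map (fun p => "    " ++ p.1 ++ " --> " ++ p.2 ++ "\n"))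
      = pvWalk prev xs ++ t := by
  induction xs with
  | nil => intro prev t; simp [pvWalk, String.empty_append]
  | cons x xs ih =>
    intro prev t
    rw [List.zip_cons_cons, List.map_cons, List.foldr_cons, ih x t]
    simp [pvWalk, String.append_assoc]

lemma aSide (steps : List (List (String × String))) :
    generate_state_diagram steps = pvOut steps := by
  simp only [generate_state_diagram, pvOut, pvComplete]
  have h := lemA steps [] ("stateDiagram-v2\n" ++ "    [*] --> INITIATED\n")
  simp only [List.nil_append, List.length_nil, Nat.cast_zero] at h
  rw [h]
  rw [show pvPrev [] = "INITIATED" from rfl]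
  cases hall : steps.all (fun s => pvStatusIs s "SUCCESS") <;>
    simp [String.append_assoc] <;> rfl

lemma bSide (steps : List (List (String × String))) :
    generate_state_diagram_alt steps = pvOut steps := by
  simp only [generate_state_diagram_alt, pvOut, pvComplete]
  rw [PySem.List.slice_from_one]
  have hfail : ((PySem.List.enumerate steps 0).find? (fun p => pvStatusIs p.2 "FAILED")).map (·.1)
      = Option.map (fun n : Nat => (n : Int)) (steps.findIdx? (fun s => pvStatusIs s "FAILED")) := by
    rw [findFail steps 0]
    cases steps.findIdx? (fun s => pvStatusIs s "FAILED") <;> simp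
  rw [hfail]
  rw [show (PySem.List.enumerate steps).map
        (fun p => pvGetD p.2 "step_id" ("STEP_" ++ PySem.Int.toStr p.1)) = pvIds steps 0 from rfl]
  rw [joinEmpty]
  have hcb := coreB steps "INITIATED" 0
  cases hfi : steps.findIdx? (fun s => pvStatusIs s "FAILED") with
  | none =>
    rw [hfi] at hcb
    dsimp only at hcb
    simp only [Option.map_none]
    rw [show PySem.List.slice (pvIds steps 0) none (some ((pvIds steps 0).length : Int))
        = pvIds steps 0 from by rw [PySem.List.slice_to_natCast, List.take_length]]
    rw [← hcb]
    cases hall : steps.all (fun s => pvStatusIs s "SUCCESS")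
    · simp only [Bool.false_eq_true, if_false]
      simp only [List.tail_cons, List.foldr_append, List.foldr_cons, List.foldr_nil, walkFold]
      simp only [String.append_empty]
    · rw [if_pos rfl, if_pos rfl]
      simp only [List.tail_cons, List.foldr_append, List.foldr_cons, List.foldr_nil, walkFold]
      simp only [String.append_empty, String.append_assoc]
  | some n =>
    rw [hfi] at hcb
    dsimp only at hcb
    rw [List.getD_eq_getElem?_getD] at hcb
    simp only [Option.map_some]
    rw [show ((n : Int) + 1) = ((n + 1 : Nat) : Int) by push_cast; ring]
    rw [PySem.List.slice_to_natCast]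
    rw [PySem.List.pyGet?_natCast]
    rw [← hcb]
    cases hall : steps.all (fun s => pvStatusIs s "SUCCESS")
    · simp only [Bool.false_eq_true, if_false]
      simp only [List.tail_cons, List.foldr_append, List.foldr_cons, List.foldr_nil, walkFold]
      simp only [String.append_empty, String.append_assoc]
    · rw [if_pos rfl, if_pos rfl]
      simp only [List.tail_cons, List.foldr_append, List.foldr_cons, List.foldr_nil, walkFold]
      simp only [String.append_empty, String.append_assoc]

-- ===== VERDICT (by name: the statement is the Claim_ definition above) =====
theorem generate_state_diagram_spec : Claim_equal_generate_state_diagram := by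
  intro steps _ _
  unfold Spec_generate_state_diagram
  rw [aSide, bSide]
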